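-- pv_equiv track=rewrite | github.com/TenmonAI/tenmon-ark | api/automation/chatts_metrics_v1.py | _brace_after_return
-- ===== SOURCE A (Python) =====
-- from typing import Any, Dict, List, Optional, Set, Tuple
--
-- def _brace_after_return(text: str, ret_match_end: int) -> Optional[int]:
--     """Skip whitespace/comments after `return` until `{` or non-ws terminator."""
--     i = ret_match_end
--     n = len(text)
--     in_sl = False
--     in_ml = False
--     while i < n:
--         c = text[i]
--         if in_sl:
--             if c == "\n":
--                 in_sl = False
--             i += 1
--             continue
--         if in_ml:
--             if c == "*" and i + 1 < n and text[i + 1] == "/":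
--                 in_ml = False
--                 i += 2
--                 continue
--             i += 1
--             continue
--         if c == "/" and i + 1 < n:
--             if text[i + 1] == "/":
--                 in_sl = True
--                 i += 2
--                 continue
--             if text[i + 1] == "*":
--                 in_ml = True
--                 i += 2
--                 continue
--         if c in " \t\n\r":
--             i += 1
--             continue
--         if c == "{":
--             return i
--         return None
--     return None
-- ===== SOURCE B (Python) =====
-- from typing import Optional
--
--
-- def _brace_after_return(text: str, ret_match_end: int) -> Optional[int]:
--     """Skip whitespace/comments after `return` until `{` or non-ws terminator."""
--     i = ret_match_end
--     n = len(text)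
--     while i < n:
--         c = text[i]
--         if c in " \t\n\r":
--             i += 1
--         elif text[i:i + 2] == "//":
--             nl = text.find("\n", i + 2)
--             i = n if nl == -1 else nl + 1
--         elif text[i:i + 2] == "/*":
--             end = text.find("*/", i + 2)
--             i = n if end == -1 else end + 2
--         elif c == "{":
--             return i
--         else:
--             return None
--     return None
-- ===== Notes on version B (the rewrite author's own statement) =====
-- stated objective: simpler
-- what changed: Replaces the flag-based per-character state machine (in_sl/in_ml booleans carried across iterations) with a stateless dispatch loop that skips whole comment spans at once via str.find.
-- outside the precondition, e.g. on _brace_after_return('//\n{', -4): A returns -1, B returns 3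
import Mathlib
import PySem

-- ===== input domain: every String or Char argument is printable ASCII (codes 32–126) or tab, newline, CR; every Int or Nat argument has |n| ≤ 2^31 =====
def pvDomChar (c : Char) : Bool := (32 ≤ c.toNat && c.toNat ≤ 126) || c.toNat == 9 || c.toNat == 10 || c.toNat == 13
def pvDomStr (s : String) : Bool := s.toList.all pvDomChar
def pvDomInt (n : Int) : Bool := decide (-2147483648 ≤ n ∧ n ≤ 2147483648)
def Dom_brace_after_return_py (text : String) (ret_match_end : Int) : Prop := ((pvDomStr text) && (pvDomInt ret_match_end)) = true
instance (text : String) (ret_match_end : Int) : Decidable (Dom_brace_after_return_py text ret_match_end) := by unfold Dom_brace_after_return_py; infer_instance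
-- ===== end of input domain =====

-- B replaces A's flag-based per-character state machine with a stateless dispatch loop
-- that skips whole comment spans via str.find (objective: simpler).

-- ===== PORT A =====
-- the while-loop of A; state = (i, in_sl, in_ml); where Python would raise IndexError
-- (pyGet? = none, only reachable when ret_match_end < -len) the port returns none (excluded by Pre_)
def braceA_loop (cs : List Char) (n i : Int) (in_sl in_ml : Bool) : Option Int :=
  if _h : i < n then
    match PySem.List.pyGet? cs i with
    | none => none
    | some c =>
      if in_sl then
        braceA_loop cs n (i + 1) (if c = '\n' then false else in_sl) in_ml
      else if in_ml then
        if c = '*' ∧ i + 1 < n ∧ PySem.List.pyGet? cs (i + 1) = some '/' then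
          braceA_loop cs n (i + 2) in_sl false
        else
          braceA_loop cs n (i + 1) in_sl in_ml
      else if c = '/' ∧ i + 1 < n ∧ PySem.List.pyGet? cs (i + 1) = some '/' then
        braceA_loop cs n (i + 2) true in_ml
      else if c = '/' ∧ i + 1 < n ∧ PySem.List.pyGet? cs (i + 1) = some '*' then
        braceA_loop cs n (i + 2) in_sl true
      else if c = ' ' ∨ c = '\t' ∨ c = '\n' ∨ c = '\r' then
        braceA_loop cs n (i + 1) in_sl in_ml
      else if c = '{' then some i
      else none
  else none
termination_by (n - i).toNat
decreasing_by all_goals omega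

def brace_after_return_py (text : String) (ret_match_end : Int) : Option Int :=
  braceA_loop text.toList (text.toList.length : Int) ret_match_end false false

-- ===== PORT B =====
-- lower bound on str.find(sub, start): a non-(-1) result is ≥ 0 and ≥ start (needed by
-- braceB_loop's termination proof, so it must precede the port)
theorem findFrom_lb (cs sub : List Char) (j : Int)
    (h : PySem.Chars.findFrom cs sub j none ≠ -1) :
    0 ≤ PySem.Chars.findFrom cs sub j none ∧ j ≤ PySem.Chars.findFrom cs sub j none := by
  simp only [PySem.Chars.findFrom] at h ⊢
  set st := (if j < 0 then if j + (cs.length:Int) < 0 then 0 else j + (cs.length:Int) else j) with hst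
  have hstb : 0 ≤ st ∧ j ≤ st := by rw [hst]; split_ifs <;> omega
  have hlb := PySem.Chars.neg_one_le_find (List.drop st.toNat (List.take ((cs.length:Int)).toNat cs)) sub
  split_ifs at h ⊢ <;> omega

-- the while-loop of B: whitespace steps by one; a comment opener jumps to just past
-- the end of the comment found by str.find (or to n when unterminated)
def braceB_loop (cs : List Char) (n i : Int) : Option Int :=
  if _h : i < n then
    match PySem.List.pyGet? cs i with
    | none => none
    | some c =>
      if c = ' ' ∨ c = '\t' ∨ c = '\n' ∨ c = '\r' then
        braceB_loop cs n (i + 1)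
      else if PySem.List.slice cs (some i) (some (i + 2)) = ['/', '/'] then
        let nl := PySem.Chars.findFrom cs ['\n'] (i + 2) none
        braceB_loop cs n (if nl = -1 then n else nl + 1)
      else if PySem.List.slice cs (some i) (some (i + 2)) = ['/', '*'] then
        let e := PySem.Chars.findFrom cs ['*', '/'] (i + 2) none
        braceB_loop cs n (if e = -1 then n else e + 2)
      else if c = '{' then some i
      else none
  else none
termination_by (n - i).toNat
decreasing_by
  · omega
  · by_cases hnl : PySem.Chars.findFrom cs ['\n'] (i + 2) none = -1
    · rw [dif_pos hnl]; omega
    · have := findFrom_lb cs ['\n'] (i + 2) hnl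
      rw [dif_neg hnl]; omega
  · by_cases he : PySem.Chars.findFrom cs ['*', '/'] (i + 2) none = -1
    · rw [dif_pos he]; omega
    · have := findFrom_lb cs ['*', '/'] (i + 2) he
      rw [dif_neg he]; omega

def brace_after_return_py_alt (text : String) (ret_match_end : Int) : Option Int :=
  braceB_loop text.toList (text.toList.length : Int) ret_match_end

-- ===== PRECONDITION & SPEC =====
-- Pre_ excludes negative ret_match_end: outside the natural domain (it is a regex
-- match-end offset, always ≥ 0); there A raises IndexError (when below -len(text)) or
-- reads wrapped-around negative indices, an accident of Python indexing.
def Pre_brace_after_return_py (text : String) (ret_match_end : Int) : Prop :=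
  0 ≤ ret_match_end
instance (text : String) (ret_match_end : Int) : Decidable (Pre_brace_after_return_py text ret_match_end) := by unfold Pre_brace_after_return_py; infer_instance

def pvWitness_brace_after_return_py : String × Int := ("ret /* c */ {", 3)

def Spec_brace_after_return_py (text : String) (ret_match_end : Int) (out : Option Int) : Prop := out = brace_after_return_py_alt text ret_match_end
instance (text : String) (ret_match_end : Int) (out : Option Int) : Decidable (Spec_brace_after_return_py text ret_match_end out) := by unfold Spec_brace_after_return_py; infer_instance

-- ===== CLAIM (what is proved, stated in full; the proofs are below) =====
def Claim_equal_brace_after_return_py : Prop := ∀ (text : String) (ret_match_end : Int), Dom_brace_after_return_py text ret_match_end → Pre_brace_after_return_py text ret_match_end → Spec_brace_after_return_py text ret_match_end (brace_after_return_py text ret_match_end)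

-- ===== LEMMAS AND PROOFS =====

-- [a] is a prefix of cs.drop k iff cs[k] = a
theorem prefix1_iff (cs : List Char) (a : Char) (k : Nat) (hk : k < cs.length) :
    ([a] <+: cs.drop k) ↔ cs[k] = a := by
  rw [List.drop_eq_getElem_cons hk, List.cons_prefix_cons]
  simp [eq_comm]

-- [a,b] is a prefix of cs.drop k iff there is room and both chars match
theorem prefix2_iff (cs : List Char) (a b : Char) (k : Nat) (hk : k < cs.length) :
    ([a, b] <+: cs.drop k) ↔ (k + 1 < cs.length ∧ cs[k] = a ∧ ∀ h : k + 1 < cs.length, cs[k+1] = b) := by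
  rw [List.drop_eq_getElem_cons hk, List.cons_prefix_cons]
  constructor
  · rintro ⟨ha, hb⟩
    by_cases h1 : k + 1 < cs.length
    · rw [List.drop_eq_getElem_cons h1, List.cons_prefix_cons] at hb
      exact ⟨h1, ha.symm, fun _ => hb.1.symm⟩
    · exfalso
      have hnil : cs.drop (k+1) = [] := List.drop_eq_nil_of_le (by omega)
      rw [hnil] at hb
      simp at hb
  · rintro ⟨h1, ha, hb⟩
    refine ⟨ha.symm, ?_⟩
    rw [List.drop_eq_getElem_cons h1, List.cons_prefix_cons]
    exact ⟨(hb h1).symm, List.nil_prefix⟩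

-- findFrom at the end of the string is -1 (sub nonempty)
theorem findFrom_len (cs sub : List Char) (hsub : sub ≠ []) :
    PySem.Chars.findFrom cs sub (cs.length : Int) none = -1 := by
  rw [PySem.Chars.findFrom_natCast_eq_neg_one_iff cs sub cs.length le_rfl]
  simp only [List.drop_length]
  intro h
  exact hsub (List.eq_nil_of_infix_nil h)

-- if sub matches at k, findFrom from k returns k
theorem findFrom_at_match (cs sub : List Char) (k : Nat) (hk : k ≤ cs.length)
    (h : sub <+: cs.drop k) :
    PySem.Chars.findFrom cs sub (k : Int) none = (k : Int) := by
  have hne : PySem.Chars.findFrom cs sub (k : Int) none ≠ -1 := by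
    intro heq
    exact ((PySem.Chars.findFrom_natCast_eq_neg_one_iff cs sub k hk).mp heq) h.isInfix
  obtain ⟨h1, h2, h3⟩ := PySem.Chars.findFrom_natCast_spec cs sub k hk hne
  by_cases hlt : k < (PySem.Chars.findFrom cs sub (k : Int) none).toNat
  · exact absurd h (h3 k le_rfl hlt)
  · omega

-- if sub does not match at k, findFrom from k = findFrom from k+1
theorem findFrom_succ (cs sub : List Char) (k : Nat) (hk : k < cs.length)
    (h : ¬ sub <+: cs.drop k) :
    PySem.Chars.findFrom cs sub (k : Int) none = PySem.Chars.findFrom cs sub ((k : Int) + 1) none := by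
  have hk1 : k + 1 ≤ cs.length := hk
  have hcast : ((k : Int) + 1) = ((k + 1 : Nat) : Int) := by push_cast; ring
  rw [hcast]
  have hdropcons : cs.drop k = cs[k] :: cs.drop (k+1) := List.drop_eq_getElem_cons hk
  by_cases hnone : PySem.Chars.findFrom cs sub (k : Int) none = -1
  · rw [hnone]
    symm
    rw [PySem.Chars.findFrom_natCast_eq_neg_one_iff cs sub (k+1) hk1]
    rw [PySem.Chars.findFrom_natCast_eq_neg_one_iff cs sub k hk.le] at hnone
    intro hin
    apply hnone
    rw [hdropcons, List.infix_cons_iff]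
    exact Or.inr hin
  · obtain ⟨h1, h2, h3⟩ := PySem.Chars.findFrom_natCast_spec cs sub k hk.le hnone
    set p := PySem.Chars.findFrom cs sub (k : Int) none with hp
    have hpk : k + 1 ≤ p.toNat := by
      rcases Nat.lt_or_ge k p.toNat with hlt | hge
      · omega
      · exfalso; apply h
        have hpe : p.toNat = k := by omega
        rwa [hpe] at h2
    have hdp : cs.drop p.toNat = (cs.drop (k+1)).drop (p.toNat - (k+1)) := by
      rw [List.drop_drop]; congr 1; omega
    have hne' : PySem.Chars.findFrom cs sub ((k+1 : Nat) : Int) none ≠ -1 := by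
      intro heq
      apply (PySem.Chars.findFrom_natCast_eq_neg_one_iff cs sub (k+1) hk1).mp heq
      rw [hdp] at h2
      exact h2.isInfix.trans (List.drop_suffix _ _).isInfix
    obtain ⟨g1, g2, g3⟩ := PySem.Chars.findFrom_natCast_spec cs sub (k+1) hk1 hne'
    set q := PySem.Chars.findFrom cs sub ((k+1 : Nat) : Int) none with hq
    have hqp : ¬ q.toNat < p.toNat := fun hlt => h3 q.toNat (by omega) hlt g2
    have hpq : ¬ p.toNat < q.toNat := fun hlt => g3 p.toNat (by omega) hlt h2
    omega

-- a hit leaves room for sub: result + |sub| ≤ |cs|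
theorem findFrom_ub (cs sub : List Char) (k : Nat) (hk : k ≤ cs.length)
    (hsub : sub ≠ []) (hne : PySem.Chars.findFrom cs sub (k : Int) none ≠ -1) :
    (PySem.Chars.findFrom cs sub (k : Int) none).toNat + sub.length ≤ cs.length := by
  obtain ⟨h1, h2, h3⟩ := PySem.Chars.findFrom_natCast_spec cs sub k hk hne
  have hlen := h2.length_le
  rw [List.length_drop] at hlen
  have hs : 0 < sub.length := List.length_pos_iff.mpr hsub
  omega

-- the two-char slice cs[k:k+2] equals [a,b] iff [a,b] is a prefix of cs.drop k
theorem slice2_iff (cs : List Char) (a b : Char) (k : Nat) :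
    PySem.List.slice cs (some (k : Int)) (some ((k : Int) + 2)) = [a, b] ↔ [a, b] <+: cs.drop k := by
  rw [show (k : Int) + 2 = ((k + 2 : Nat) : Int) by push_cast; ring, PySem.List.slice_natCast]
  rw [show k + 2 - k = 2 by omega]
  constructor
  · intro h
    have hl : (List.take 2 (cs.drop k)).length = 2 := by rw [h]; rfl
    rw [List.length_take] at hl
    rw [List.prefix_iff_eq_take, show ([a,b] : List Char).length = 2 from rfl]
    exact h.symm
  · intro h
    rw [List.prefix_iff_eq_take, show ([a,b] : List Char).length = 2 from rfl] at h
    exact h.symm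

-- A's single-line-comment mode: from position k it jumps to just past the next '\n'
theorem sl_skip (cs : List Char) : ∀ (d k : Nat), k ≤ cs.length → cs.length - k ≤ d →
    braceA_loop cs (cs.length : Int) (k : Int) true false =
      (if PySem.Chars.findFrom cs ['\n'] (k : Int) none = -1 then none
       else braceA_loop cs (cs.length : Int) (PySem.Chars.findFrom cs ['\n'] (k : Int) none + 1) false false) := by
  intro d
  induction d with
  | zero =>
    intro k hk hd
    have hke : k = cs.length := by omega
    subst hke
    rw [braceA_loop, dif_neg (by omega : ¬ ((cs.length : Int) < (cs.length : Int)))]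
    rw [findFrom_len cs ['\n'] (by simp), if_pos rfl]
  | succ d ih =>
    intro k hk hd
    by_cases hkl : k < cs.length
    · have hlt : (k : Int) < (cs.length : Int) := by exact_mod_cast hkl
      have hget : PySem.List.pyGet? cs (k : Int) = some cs[k] := by
        simp [List.getElem?_eq_getElem hkl]
      rw [braceA_loop]
      simp only [dif_pos hlt, hget, if_true]
      by_cases hc : cs[k] = '\n'
      · have hf : PySem.Chars.findFrom cs ['\n'] (k : Int) none = (k : Int) :=
          findFrom_at_match cs ['\n'] k hk ((prefix1_iff cs '\n' k hkl).mpr hc)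
        rw [hf, if_neg (by omega : ¬ ((k : Int) = -1))]
        simp [hc]
      · have hf := findFrom_succ cs ['\n'] k hkl
          (fun hp => hc ((prefix1_iff cs '\n' k hkl).mp hp))
        rw [hf]
        simp only [hc, if_false]
        rw [show (k : Int) + 1 = ((k + 1 : Nat) : Int) by push_cast; ring]
        exact ih (k+1) hkl (by omega)
    · have hke : k = cs.length := by omega
      subst hke
      rw [braceA_loop, dif_neg (by omega : ¬ ((cs.length : Int) < (cs.length : Int)))]
      rw [findFrom_len cs ['\n'] (by simp), if_pos rfl]

-- A's multi-line-comment mode: from position k it jumps to just past the next "*/"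
theorem ml_skip (cs : List Char) : ∀ (d k : Nat), k ≤ cs.length → cs.length - k ≤ d →
    braceA_loop cs (cs.length : Int) (k : Int) false true =
      (if PySem.Chars.findFrom cs ['*', '/'] (k : Int) none = -1 then none
       else braceA_loop cs (cs.length : Int) (PySem.Chars.findFrom cs ['*', '/'] (k : Int) none + 2) false false) := by
  intro d
  induction d with
  | zero =>
    intro k hk hd
    have hke : k = cs.length := by omega
    subst hke
    rw [braceA_loop, dif_neg (by omega : ¬ ((cs.length : Int) < (cs.length : Int)))]
    rw [findFrom_len cs ['*', '/'] (by simp), if_pos rfl]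
  | succ d ih =>
    intro k hk hd
    by_cases hkl : k < cs.length
    · have hlt : (k : Int) < (cs.length : Int) := by exact_mod_cast hkl
      have hget : PySem.List.pyGet? cs (k : Int) = some cs[k] := by
        simp [List.getElem?_eq_getElem hkl]
      rw [braceA_loop]
      simp only [dif_pos hlt, hget, Bool.false_eq_true, if_false, if_true]
      by_cases hm : ['*', '/'] <+: cs.drop k
      · obtain ⟨h1, ha, hb⟩ := (prefix2_iff cs '*' '/' k hkl).mp hm
        have hm1 : (k : Int) + 1 < (cs.length : Int) := by exact_mod_cast h1
        have hget1 : PySem.List.pyGet? cs ((k : Int) + 1) = some '/' := by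
          rw [show (k : Int) + 1 = ((k + 1 : Nat) : Int) by push_cast; ring,
            PySem.List.pyGet?_natCast, List.getElem?_eq_getElem h1, hb h1]
        rw [if_pos ⟨ha, hm1, hget1⟩]
        have hf := findFrom_at_match cs ['*', '/'] k hk hm
        rw [hf, if_neg (by omega : ¬ ((k : Int) = -1))]
      · have hnc : ¬ (cs[k] = '*' ∧ (k : Int) + 1 < (cs.length : Int) ∧ PySem.List.pyGet? cs ((k : Int) + 1) = some '/') := by
          rintro ⟨ha, hlt1, hg⟩
          apply hm
          have h1 : k + 1 < cs.length := by exact_mod_cast hlt1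
          rw [show (k : Int) + 1 = ((k + 1 : Nat) : Int) by push_cast; ring,
            PySem.List.pyGet?_natCast, List.getElem?_eq_getElem h1] at hg
          simp only [Option.some.injEq] at hg
          exact (prefix2_iff cs '*' '/' k hkl).mpr ⟨h1, ha, fun _ => hg⟩
        rw [if_neg hnc]
        have hf := findFrom_succ cs ['*', '/'] k hkl hm
        rw [hf]
        rw [show (k : Int) + 1 = ((k + 1 : Nat) : Int) by push_cast; ring]
        exact ih (k+1) hkl (by omega)
    · have hke : k = cs.length := by omega
      subst hke
      rw [braceA_loop, dif_neg (by omega : ¬ ((cs.length : Int) < (cs.length : Int)))]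
      rw [findFrom_len cs ['*', '/'] (by simp), if_pos rfl]

-- main equivalence of the two loops from any nonnegative in-range position
theorem main_lemma (cs : List Char) : ∀ (d k : Nat), k ≤ cs.length → cs.length - k ≤ d →
    braceA_loop cs (cs.length : Int) (k : Int) false false =
    braceB_loop cs (cs.length : Int) (k : Int) := by
  intro d
  induction d with
  | zero =>
    intro k hk hd
    have hke : k = cs.length := by omega
    subst hke
    rw [braceA_loop, braceB_loop]
    rw [dif_neg (by omega : ¬ ((cs.length : Int) < (cs.length : Int)))]
    rw [dif_neg (by omega : ¬ ((cs.length : Int) < (cs.length : Int)))]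
  | succ d ih =>
    intro k hk hd
    by_cases hkl : k < cs.length
    · have hlt : (k : Int) < (cs.length : Int) := by exact_mod_cast hkl
      have hget : PySem.List.pyGet? cs (k : Int) = some cs[k] := by
        simp [List.getElem?_eq_getElem hkl]
      have hcast1 : (k : Int) + 1 = ((k + 1 : Nat) : Int) := by push_cast; ring
      have hcast2 : (k : Int) + 2 = ((k + 2 : Nat) : Int) := by push_cast; ring
      rw [braceA_loop, braceB_loop]
      simp only [dif_pos hlt, hget, Bool.false_eq_true, if_false]
      by_cases hsl : ['/', '/'] <+: cs.drop k
      · obtain ⟨h1, ha, hb⟩ := (prefix2_iff cs '/' '/' k hkl).mp hsl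
        have hm1 : (k : Int) + 1 < (cs.length : Int) := by exact_mod_cast h1
        have hget1 : PySem.List.pyGet? cs ((k : Int) + 1) = some '/' := by
          rw [hcast1, PySem.List.pyGet?_natCast, List.getElem?_eq_getElem h1, hb h1]
        rw [if_pos ⟨ha, hm1, hget1⟩]
        rw [if_neg (by simp [ha] : ¬ (cs[k] = ' ' ∨ cs[k] = '\t' ∨ cs[k] = '\n' ∨ cs[k] = '\r'))]
        rw [if_pos ((slice2_iff cs '/' '/' k).mpr hsl)]
        rw [hcast2, sl_skip cs cs.length (k+2) (by omega) (by omega)]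
        set f := PySem.Chars.findFrom cs ['\n'] ((k + 2 : Nat) : Int) none with hfdef
        by_cases hf : f = -1
        · rw [if_pos hf]
          show none = braceB_loop cs (cs.length : Int) (if f = -1 then (cs.length : Int) else f + 1)
          rw [if_pos hf, braceB_loop, dif_neg (by omega : ¬ ((cs.length : Int) < (cs.length : Int)))]
        · rw [if_neg hf]
          show _ = braceB_loop cs (cs.length : Int) (if f = -1 then (cs.length : Int) else f + 1)
          rw [if_neg hf]
          obtain ⟨hf0, hfge⟩ := findFrom_lb cs ['\n'] ((k + 2 : Nat) : Int) hf
          have hub := findFrom_ub cs ['\n'] (k+2) (by omega) (by simp) hf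
          rw [← hfdef] at hf0 hfge hub
          rw [show f + 1 = ((f.toNat + 1 : Nat) : Int) by omega]
          exact ih (f.toNat + 1) (by simp at hub; omega) (by omega)
      · by_cases hml : ['/', '*'] <+: cs.drop k
        · obtain ⟨h1, ha, hb⟩ := (prefix2_iff cs '/' '*' k hkl).mp hml
          have hm1 : (k : Int) + 1 < (cs.length : Int) := by exact_mod_cast h1
          have hget1 : PySem.List.pyGet? cs ((k : Int) + 1) = some '*' := by
            rw [hcast1, PySem.List.pyGet?_natCast, List.getElem?_eq_getElem h1, hb h1]
          have hncsl : ¬ (cs[k] = '/' ∧ (k : Int) + 1 < (cs.length : Int) ∧ PySem.List.pyGet? cs ((k : Int) + 1) = some '/') := by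
            rintro ⟨_, _, hg⟩
            rw [hget1] at hg
            simp at hg
          rw [if_neg hncsl, if_pos ⟨ha, hm1, hget1⟩]
          rw [if_neg (by simp [ha] : ¬ (cs[k] = ' ' ∨ cs[k] = '\t' ∨ cs[k] = '\n' ∨ cs[k] = '\r'))]
          rw [if_neg (fun h => hsl ((slice2_iff cs '/' '/' k).mp h))]
          rw [if_pos ((slice2_iff cs '/' '*' k).mpr hml)]
          rw [hcast2, ml_skip cs cs.length (k+2) (by omega) (by omega)]
          set f := PySem.Chars.findFrom cs ['*', '/'] ((k + 2 : Nat) : Int) none with hfdef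
          by_cases hf : f = -1
          · rw [if_pos hf]
            show none = braceB_loop cs (cs.length : Int) (if f = -1 then (cs.length : Int) else f + 2)
            rw [if_pos hf, braceB_loop, dif_neg (by omega : ¬ ((cs.length : Int) < (cs.length : Int)))]
          · rw [if_neg hf]
            show _ = braceB_loop cs (cs.length : Int) (if f = -1 then (cs.length : Int) else f + 2)
            rw [if_neg hf]
            obtain ⟨hf0, hfge⟩ := findFrom_lb cs ['*', '/'] ((k + 2 : Nat) : Int) hf
            have hub := findFrom_ub cs ['*', '/'] (k+2) (by omega) (by simp) hf
            rw [← hfdef] at hf0 hfge hub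
            rw [show f + 2 = ((f.toNat + 2 : Nat) : Int) by omega]
            exact ih (f.toNat + 2) (by simp at hub; omega) (by omega)
        · have hncsl : ¬ (cs[k] = '/' ∧ (k : Int) + 1 < (cs.length : Int) ∧ PySem.List.pyGet? cs ((k : Int) + 1) = some '/') := by
            rintro ⟨ha, hlt1, hg⟩
            apply hsl
            have h1 : k + 1 < cs.length := by exact_mod_cast hlt1
            rw [hcast1, PySem.List.pyGet?_natCast, List.getElem?_eq_getElem h1] at hg
            simp only [Option.some.injEq] at hg
            exact (prefix2_iff cs '/' '/' k hkl).mpr ⟨h1, ha, fun _ => hg⟩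
          have hncml : ¬ (cs[k] = '/' ∧ (k : Int) + 1 < (cs.length : Int) ∧ PySem.List.pyGet? cs ((k : Int) + 1) = some '*') := by
            rintro ⟨ha, hlt1, hg⟩
            apply hml
            have h1 : k + 1 < cs.length := by exact_mod_cast hlt1
            rw [hcast1, PySem.List.pyGet?_natCast, List.getElem?_eq_getElem h1] at hg
            simp only [Option.some.injEq] at hg
            exact (prefix2_iff cs '/' '*' k hkl).mpr ⟨h1, ha, fun _ => hg⟩
          rw [if_neg hncsl, if_neg hncml]
          rw [if_neg (fun h => hsl ((slice2_iff cs '/' '/' k).mp h))]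
          rw [if_neg (fun h => hml ((slice2_iff cs '/' '*' k).mp h))]
          by_cases hws : cs[k] = ' ' ∨ cs[k] = '\t' ∨ cs[k] = '\n' ∨ cs[k] = '\r'
          · rw [if_pos hws, if_pos hws, hcast1]
            exact ih (k+1) hkl (by omega)
          · rw [if_neg hws, if_neg hws]
    · have hke : k = cs.length := by omega
      subst hke
      rw [braceA_loop, braceB_loop]
      rw [dif_neg (by omega : ¬ ((cs.length : Int) < (cs.length : Int)))]
      rw [dif_neg (by omega : ¬ ((cs.length : Int) < (cs.length : Int)))]

-- ===== VERDICT (by name: the statement is the Claim_ definition above) =====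
theorem brace_after_return_py_spec : Claim_equal_brace_after_return_py := by
  intro text ret_match_end _hdom hpre
  unfold Spec_brace_after_return_py brace_after_return_py brace_after_return_py_alt
  unfold Pre_brace_after_return_py at hpre
  set cs := text.toList with hcs
  by_cases hle : ret_match_end ≤ (cs.length : Int)
  · rw [show ret_match_end = ((ret_match_end.toNat : Nat) : Int) by omega]
    exact main_lemma cs cs.length ret_match_end.toNat (by omega) (by omega)
  · rw [braceA_loop, braceB_loop]
    rw [dif_neg (by omega : ¬ (ret_match_end < (cs.length : Int)))]
    rw [dif_neg (by omega : ¬ (ret_match_end < (cs.length : Int)))]
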